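-- pv_equiv track=rewrite | github.com/zeal4u/ChampSim | utils.py | hash_index
-- ===== SOURCE A (Python) =====
-- def hash_index(key, index_len):
--     if index_len == 0:
--         return key
--     tag = key >> index_len
--     while tag > 0:
--         key ^= tag & ((1 << index_len) - 1)
--         tag = tag >> index_len
--     return key
-- ===== SOURCE B (Python) =====
-- def hash_index(key, index_len):
--     if index_len == 0 or key >> index_len <= 0:
--         return key
--     nbits = key.bit_length()
--     out = (key >> index_len) << index_len
--     for i in range(index_len):
--         comb = 0
--         for j in range(i, nbits, index_len):
--             comb |= 1 << j
--         if (key & comb).bit_count() & 1: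
--             out |= 1 << i
--     return out
-- ===== Notes on version B (the rewrite author's own statement) =====
-- stated objective: alternative
-- what changed: B is bit-transposed: instead of A's sequential chunk-XOR loop that shifts a tag and XORs it into key, B computes each output bit i < index_len independently by building a comb mask of positions i, i+L, i+2L, ... and testing whether popcount(key & comb) is odd, then ORs those bits onto the preserved high part (key >> L) << L.
import Mathlib
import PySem

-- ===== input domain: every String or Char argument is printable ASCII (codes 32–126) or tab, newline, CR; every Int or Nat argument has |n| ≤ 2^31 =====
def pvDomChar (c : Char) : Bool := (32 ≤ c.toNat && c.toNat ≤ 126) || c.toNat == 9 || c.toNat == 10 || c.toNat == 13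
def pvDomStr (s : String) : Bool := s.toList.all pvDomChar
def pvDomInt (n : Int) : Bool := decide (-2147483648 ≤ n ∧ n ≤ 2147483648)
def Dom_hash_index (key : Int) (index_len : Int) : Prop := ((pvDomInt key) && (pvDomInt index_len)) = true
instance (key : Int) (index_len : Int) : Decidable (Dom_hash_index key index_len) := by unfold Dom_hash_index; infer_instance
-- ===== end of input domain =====

-- B computes each output bit i < index_len independently (popcount parity of key masked by a
-- comb of positions i, i+L, i+2L, …, OR-ed onto the preserved high bits) instead of A's
-- sequential chunk-XOR accumulation; same return value (objective: alternative, not faster).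

-- ===== PORT A =====
-- measure decrease for A's loop: shifting a positive t right by L ≥ 1 strictly shrinks it
lemma shiftR_toNat_lt (t : Int) (L : Nat) (ht : 0 < t) (hL : 0 < L) : (t >>> L).toNat < t.toNat := by
  have hc : ((2 ^ L : Nat) : Int) = 2 ^ L := by push_cast; ring
  have he : t >>> L = ((t.toNat / 2 ^ L : Nat) : Int) := by
    rw [Int.shiftRight_eq_div_pow, Int.natCast_ediv, hc]
    congr 1
    omega
  have hlt : t.toNat / 2 ^ L < t.toNat :=
    Nat.div_lt_self (by omega) (Nat.one_lt_two_pow_iff.mpr (by omega))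
  omega

-- A's while loop: `while tag > 0: key ^= tag & ((1 << index_len) - 1); tag >>= index_len`.
-- The extra `0 < L` in the guard is a totality guard only: Python never reaches the loop with
-- index_len ≤ 0 (index_len = 0 returns early, index_len < 0 raises, excluded by Pre_).
def hashLoopA (L : Nat) (key tag : Int) : Int :=
  if h : 0 < tag ∧ 0 < L then
    hashLoopA L (PySem.Int.bxor key (PySem.Int.band tag (((1 : Int) <<< L) - 1))) (tag >>> L)
  else key
termination_by tag.toNat
decreasing_by exact shiftR_toNat_lt tag L h.1 h.2

def hash_index (key : Int) (index_len : Int) : Int :=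
  if index_len = 0 then key
  else hashLoopA index_len.toNat key (key >>> index_len.toNat)

-- ===== PORT B =====
-- Transliteration of Source B.  Shift amounts `index_len`, `i`, `j` are nonnegative wherever Python
-- reaches them (i, j come from ranges with nonnegative start), so `.toNat` is exact there.
def hash_index_alt (key : Int) (index_len : Int) : Int :=
  if index_len = 0 ∨ key >>> index_len.toNat ≤ 0 then key
  else
    let nbits : Int := (PySem.Int.bitLength key : Int)
    let out0 : Int := (key >>> index_len.toNat) <<< index_len.toNat
    (PySem.List.pyRange 0 index_len 1).foldl
      (fun out i =>
        let comb : Int := (PySem.List.pyRange i nbits index_len).foldl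
          (fun c j => PySem.Int.bor c ((1 : Int) <<< j.toNat)) 0
        if PySem.Int.bitCount (PySem.Int.band key comb) &&& 1 ≠ 0 then
          PySem.Int.bor out ((1 : Int) <<< i.toNat)
        else out) out0

-- ===== PRECONDITION & SPEC =====
-- Python raises ValueError ("negative shift count") for index_len < 0; nothing else raises.
def Pre_hash_index (key : Int) (index_len : Int) : Prop := 0 ≤ index_len
instance (key : Int) (index_len : Int) : Decidable (Pre_hash_index key index_len) := by unfold Pre_hash_index; infer_instance
def pvWitness_hash_index : Int × Int := (13, 2)

def Spec_hash_index (key : Int) (index_len : Int) (out : Int) : Prop := out = hash_index_alt key index_len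
instance (key : Int) (index_len : Int) (out : Int) : Decidable (Spec_hash_index key index_len out) := by unfold Spec_hash_index; infer_instance

-- ===== CLAIM (what is proved, stated in full; the proofs are below) =====
def Claim_equal_hash_index : Prop := ∀ (key : Int) (index_len : Int), Dom_hash_index key index_len → Pre_hash_index key index_len → Spec_hash_index key index_len (hash_index key index_len)

-- ===== LEMMAS AND PROOFS =====

-- ---------- A-side: A's loop = preserved high bits + XOR-fold of the chunks ----------

-- proof-side model of a chunk-XOR accumulator loop (used only to relate the two ports)
def foldChunks (L : Nat) (mask t folded : Int) : Int :=
  if h : 0 < t ∧ 0 < L then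
    foldChunks L mask (t >>> L) (PySem.Int.bxor folded (PySem.Int.band t mask))
  else folded
termination_by t.toNat
decreasing_by exact shiftR_toNat_lt t L h.1 h.2

-- Nat: xor by a value below 2^L touches only the low L bits.
lemma nat_xor_low (L q r c : Nat) (hr : r < 2 ^ L) (hc : c < 2 ^ L) :
    (2 ^ L * q + r) ^^^ c = 2 ^ L * q + (r ^^^ c) := by
  have hx : r ^^^ c < 2 ^ L := Nat.xor_lt_two_pow hr hc
  apply Nat.eq_of_testBit_eq
  intro i
  rw [Nat.testBit_xor, Nat.testBit_two_pow_mul_add _ hr, Nat.testBit_two_pow_mul_add _ hx]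
  by_cases hi : i < L
  · simp [hi]
  · have : c.testBit i = false := Nat.testBit_lt_two_pow (lt_of_lt_of_le hc (Nat.pow_le_pow_right (by omega) (by omega)))
    simp [hi, this]

-- Nat: xor with the all-ones mask 2^L-1 is complement within the mask.
lemma nat_xor_mask_compl (L : Nat) : ∀ r, r < 2 ^ L → (2 ^ L - 1) ^^^ r = 2 ^ L - 1 - r := by
  induction L with
  | zero => intro r hr; interval_cases r <;> rfl
  | succ L ih =>
    intro r hr
    have hb : r = 2 * (r / 2) + r % 2 := by omega
    have hr2 : r / 2 < 2 ^ L := by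
      have : 2 ^ (L + 1) = 2 * 2 ^ L := by ring
      omega
    have hmask : (2 ^ (L + 1) - 1 : Nat) = Nat.bit true (2 ^ L - 1) := by
      simp [Nat.bit]
      have : (1:Nat) ≤ 2 ^ L := Nat.one_le_two_pow
      have : 2 ^ (L + 1) = 2 * 2 ^ L := by ring
      omega
    have hrbit : r = Nat.bit (r % 2 = 1) (r / 2) := by
      rcases Nat.mod_two_eq_zero_or_one r with h | h <;> simp [Nat.bit, h] <;> omega
    rw [hmask, hrbit, Nat.xor_bit]
    have hxr := ih (r / 2) hr2
    have hxlt : (2 ^ L - 1) ^^^ r / 2 ≤ 2 ^ L - 1 := by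
      have := Nat.xor_lt_two_pow (x := 2 ^ L - 1) (y := r / 2) (n := L) (by have := Nat.one_le_two_pow (n := L); omega) hr2
      omega
    have h2L : (1:Nat) ≤ 2 ^ L := Nat.one_le_two_pow
    have hp : 2 ^ (L + 1) = 2 * 2 ^ L := by ring
    rcases Nat.mod_two_eq_zero_or_one r with h | h <;>
      simp [h, Nat.bit, hxr] <;> omega

-- bxor of two nonnegative values below 2^L stays in [0, 2^L).
lemma bxor_lt (L : Nat) (r a : Int) (hr0 : 0 ≤ r) (hr : r < 2 ^ L) (ha0 : 0 ≤ a) (ha : a < 2 ^ L) :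
    0 ≤ PySem.Int.bxor r a ∧ PySem.Int.bxor r a < 2 ^ L := by
  have hcast : ((2 ^ L : Nat) : Int) = 2 ^ L := by push_cast; ring
  rw [PySem.Int.bxor_of_nonneg hr0 ha0]
  have hrn : r.toNat < 2 ^ L := by omega
  have han : a.toNat < 2 ^ L := by omega
  have := Nat.xor_lt_two_pow hrn han
  constructor
  · positivity
  · exact_mod_cast this

-- Core lemma: xor by a value below 2^L splits into the untouched high part plus a low-bit xor.
lemma bxor_split (L : Nat) (key a : Int) (ha0 : 0 ≤ a) (ha : a < 2 ^ L) :
    PySem.Int.bxor key a = 2 ^ L * (key / 2 ^ L) + PySem.Int.bxor (key % 2 ^ L) a := by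
  have hP : (0:Int) < 2 ^ L := by positivity
  have hcast : ((2 ^ L : Nat) : Int) = 2 ^ L := by push_cast; ring
  have haN : a.toNat < 2 ^ L := by omega
  by_cases hk : 0 ≤ key
  · have hm0 : (0:Int) ≤ key % 2 ^ L := Int.emod_nonneg key (by omega)
    rw [PySem.Int.bxor_of_nonneg hk ha0, PySem.Int.bxor_of_nonneg hm0 ha0]
    have hdiv : key / 2 ^ L = ((key.toNat / 2 ^ L : Nat) : Int) := by
      rw [Int.natCast_ediv, hcast]; congr 1; omega
    have hmod : (key % 2 ^ L).toNat = key.toNat % 2 ^ L := by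
      have h1 : key % 2 ^ L = ((key.toNat % 2 ^ L : Nat) : Int) := by
        rw [Int.natCast_emod, hcast]; congr 1; omega
      omega
    have hsplit : key.toNat = 2 ^ L * (key.toNat / 2 ^ L) + key.toNat % 2 ^ L :=
      (Nat.div_add_mod key.toNat (2 ^ L)).symm
    have hx := nat_xor_low L (key.toNat / 2 ^ L) (key.toNat % 2 ^ L) a.toNat
      (Nat.mod_lt _ (by positivity)) haN
    rw [hmod, hdiv]
    rw [show key.toNat ^^^ a.toNat = 2 ^ L * (key.toNat / 2 ^ L) + key.toNat % 2 ^ L ^^^ a.toNat by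
          conv_lhs => rw [hsplit]
        , hx]
    push_cast
    ring
  · set m : Nat := (-key - 1).toNat with hm
    have hkey : key = -(m : Int) - 1 := by omega
    have hbx : PySem.Int.bxor key a = -((m ^^^ a.toNat : Nat) : Int) - 1 := by
      unfold PySem.Int.bxor
      rw [if_neg (by omega), if_pos ha0]
    set q : Nat := m / 2 ^ L with hq
    set r : Nat := m % 2 ^ L with hr
    have hrlt : r < 2 ^ L := Nat.mod_lt _ (by positivity)
    have hmsplit : m = 2 ^ L * q + r := (Nat.div_add_mod m (2 ^ L)).symm
    have hxm : m ^^^ a.toNat = 2 ^ L * q + (r ^^^ a.toNat) := by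
      conv_lhs => rw [hmsplit]
      exact nat_xor_low L q r a.toNat hrlt haN
    have hxlt : r ^^^ a.toNat < 2 ^ L := Nat.xor_lt_two_pow hrlt haN
    have hkeyeq : key = 2 ^ L * (-(q:Int) - 1) + (2 ^ L - 1 - r) := by
      rw [hkey]; push_cast [hmsplit]; ring
    have hlow0 : (0:Int) ≤ 2 ^ L - 1 - r := by
      have : (r:Int) < 2 ^ L := by exact_mod_cast hrlt
      omega
    have hlow1 : (2:Int) ^ L - 1 - r < 2 ^ L := by omega
    have hdiv : key / 2 ^ L = -(q:Int) - 1 := by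
      rw [hkeyeq, show (2:Int) ^ L * (-(q:Int) - 1) + (2 ^ L - 1 - r) = (2 ^ L - 1 - r) + (-(q:Int) - 1) * 2 ^ L by ring,
          Int.add_mul_ediv_right _ _ (by omega : (2:Int) ^ L ≠ 0),
          Int.ediv_eq_zero_of_lt hlow0 hlow1]
      ring
    have hmod : key % 2 ^ L = 2 ^ L - 1 - r := by
      rw [hkeyeq, show (2:Int) ^ L * (-(q:Int) - 1) + (2 ^ L - 1 - r) = (2 ^ L - 1 - r) + (-(q:Int) - 1) * 2 ^ L by ring,
          Int.add_mul_emod_self_right]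
      exact Int.emod_eq_of_lt hlow0 hlow1
    have hrhsx : PySem.Int.bxor (key % 2 ^ L) a = ((((2 ^ L - 1 - r) ^^^ a.toNat : Nat)) : Int) := by
      rw [hmod]
      rw [PySem.Int.bxor_of_nonneg hlow0 ha0]
      congr 2
      have h1 : (1:Nat) ≤ 2 ^ L := Nat.one_le_two_pow
      omega
    have hcompl1 := nat_xor_mask_compl L r hrlt
    have hcompl2 := nat_xor_mask_compl L (r ^^^ a.toNat) hxlt
    have hkeyc : (2 ^ L - 1 - r) ^^^ a.toNat = 2 ^ L - 1 - (r ^^^ a.toNat) := by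
      rw [← hcompl1, Nat.xor_assoc, hcompl2]
    rw [hbx, hrhsx, hdiv, hkeyc]
    have h1 : (1:Nat) ≤ 2 ^ L := Nat.one_le_two_pow
    have hcm : ((m ^^^ a.toNat : Nat) : Int) = 2 ^ L * q + ((r ^^^ a.toNat : Nat) : Int) := by
      rw [hxm]; push_cast; ring
    have hcs : ((2 ^ L - 1 - (r ^^^ a.toNat) : Nat) : Int) = 2 ^ L - 1 - ((r ^^^ a.toNat : Nat) : Int) := by
      have hle : (r ^^^ a.toNat) ≤ 2 ^ L - 1 := by omega
      push_cast [Nat.cast_sub hle, Nat.cast_sub h1]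
      ring
    rw [hcm, hcs]
    ring

-- the mask ((1 : Int) <<< L) - 1 is 2^L - 1
lemma mask_eq (L : Nat) : ((1:Int) <<< L) - 1 = 2 ^ L - 1 := by
  rw [Int.shiftLeft_eq]; ring

-- band with the mask: bounds for band t ((1<<<L)-1) when 0 < t
lemma band_mask_bounds (L : Nat) (t : Int) (ht : 0 < t) :
    0 ≤ PySem.Int.band t (((1 : Int) <<< L) - 1) ∧ PySem.Int.band t (((1 : Int) <<< L) - 1) < 2 ^ L := by
  have h1 : (1:Nat) ≤ 2 ^ L := Nat.one_le_two_pow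
  have hm0 : (0:Int) ≤ ((1 : Int) <<< L) - 1 := by
    rw [mask_eq]
    have hp : (0:Int) < 2 ^ L := by positivity
    omega
  rw [PySem.Int.band_of_nonneg (by omega) hm0]
  have hmt : ((1:Int) <<< L - 1).toNat = 2 ^ L - 1 := by
    rw [mask_eq]
    have : ((2:Int) ^ L) = ((2 ^ L : Nat) : Int) := by push_cast; ring
    omega
  rw [hmt]
  have hle : t.toNat &&& (2 ^ L - 1) ≤ 2 ^ L - 1 := Nat.and_le_right
  constructor
  · positivity
  · exact_mod_cast (by omega : (t.toNat &&& (2 ^ L - 1) : Nat) < 2 ^ L)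

-- shifts as division / multiplication
lemma shiftR_eq (t : Int) (L : Nat) : t >>> L = t / 2 ^ L := by
  simp [Int.shiftRight_eq_div_pow]

-- band with the all-ones mask is mod, every Int key
lemma band_mask_eq_mod (L : Nat) (key : Int) :
    PySem.Int.band key (((1 : Int) <<< L) - 1) = key % 2 ^ L := by
  have h1 : (1:Nat) ≤ 2 ^ L := Nat.one_le_two_pow
  have hm0 : (0:Int) ≤ ((1 : Int) <<< L) - 1 := by
    rw [mask_eq]
    have hp : (0:Int) < 2 ^ L := by positivity
    omega
  have hmt : ((1:Int) <<< L - 1).toNat = 2 ^ L - 1 := by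
    rw [mask_eq]
    have : ((2:Int) ^ L) = ((2 ^ L : Nat) : Int) := by push_cast; ring
    omega
  by_cases hk : 0 ≤ key
  · rw [PySem.Int.band_of_nonneg hk hm0, hmt, Nat.and_two_pow_sub_one_eq_mod]
    have hcast : ((2 ^ L : Nat) : Int) = 2 ^ L := by push_cast; ring
    rw [Int.natCast_emod, hcast]
    congr 1
    omega
  · unfold PySem.Int.band
    rw [if_neg (by omega), if_pos hm0, hmt]
    set m : Nat := (-key - 1).toNat with hm
    have hkey : key = -(m : Int) - 1 := by omega
    rw [Nat.and_comm, Nat.and_two_pow_sub_one_eq_mod]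
    set r : Nat := m % 2 ^ L with hr
    have hrlt : r < 2 ^ L := Nat.mod_lt _ (by positivity)
    set q : Nat := m / 2 ^ L with hq
    have hmsplit : m = 2 ^ L * q + r := (Nat.div_add_mod m (2 ^ L)).symm
    have hkeyeq : key = 2 ^ L * (-(q:Int) - 1) + (2 ^ L - 1 - r) := by
      rw [hkey]; push_cast [hmsplit]; ring
    have hlow0 : (0:Int) ≤ 2 ^ L - 1 - r := by
      have : (r:Int) < 2 ^ L := by exact_mod_cast hrlt
      omega
    have hlow1 : (2:Int) ^ L - 1 - r < 2 ^ L := by omega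
    have hmod : key % 2 ^ L = 2 ^ L - 1 - r := by
      rw [hkeyeq, show (2:Int) ^ L * (-(q:Int) - 1) + (2 ^ L - 1 - r) = (2 ^ L - 1 - r) + (-(q:Int) - 1) * 2 ^ L by ring,
          Int.add_mul_emod_self_right]
      exact Int.emod_eq_of_lt hlow0 hlow1
    rw [hmod]
    have : (2 ^ L - 1 - r : Nat) = ((2 ^ L - 1 - r : Nat) : Int).toNat := by omega
    push_cast [Nat.cast_sub (by omega : r ≤ 2 ^ L - 1), Nat.cast_sub h1]
    ring

-- THE A-SIDE INVARIANT: A's loop equals high-bits-of-key plus the chunk fold of key's low bits.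
lemma loop_invariant (L : Nat) (hL : 0 < L) :
    ∀ n (t : Int), t.toNat = n → ∀ key : Int,
      hashLoopA L key t = ((key >>> L) <<< L) + foldChunks L (((1 : Int) <<< L) - 1) t (PySem.Int.band key (((1 : Int) <<< L) - 1)) := by
  intro n
  induction n using Nat.strong_induction_on with
  | _ n ih =>
    intro t htn key
    have hP : (0:Int) < 2 ^ L := by positivity
    by_cases ht : 0 < t
    · have hguard : (0 < t ∧ 0 < L) := ⟨ht, hL⟩
      rw [hashLoopA, dif_pos hguard]
      conv_rhs => rw [foldChunks, dif_pos hguard]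
      set a : Int := PySem.Int.band t (((1 : Int) <<< L) - 1) with ha
      obtain ⟨ha0, haP⟩ := band_mask_bounds L t ht
      set key' : Int := PySem.Int.bxor key a with hk'
      have hdec : (t >>> L).toNat < n := by
        have := shiftR_toNat_lt t L ht hL
        omega
      have IH := ih _ hdec (t >>> L) rfl key'
      rw [IH]
      have hsplit := bxor_split L key a ha0 haP
      have hdiv' : key' / 2 ^ L = key / 2 ^ L := by
        rw [hk', hsplit]
        obtain ⟨hx0, hxP⟩ := bxor_lt L (key % 2 ^ L) a (Int.emod_nonneg key (by omega)) (Int.emod_lt_of_pos key hP) ha0 haP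
        rw [show (2:Int) ^ L * (key / 2 ^ L) + PySem.Int.bxor (key % 2 ^ L) a
              = PySem.Int.bxor (key % 2 ^ L) a + (key / 2 ^ L) * 2 ^ L by ring,
            Int.add_mul_ediv_right _ _ (by omega : (2:Int) ^ L ≠ 0),
            Int.ediv_eq_zero_of_lt hx0 hxP]
        ring
      have hmod' : PySem.Int.band key' (((1 : Int) <<< L) - 1) = PySem.Int.bxor (PySem.Int.band key (((1 : Int) <<< L) - 1)) a := by
        rw [band_mask_eq_mod, band_mask_eq_mod, hk', hsplit]
        obtain ⟨hx0, hxP⟩ := bxor_lt L (key % 2 ^ L) a (Int.emod_nonneg key (by omega)) (Int.emod_lt_of_pos key hP) ha0 haP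
        rw [show (2:Int) ^ L * (key / 2 ^ L) + PySem.Int.bxor (key % 2 ^ L) a
              = PySem.Int.bxor (key % 2 ^ L) a + (key / 2 ^ L) * 2 ^ L by ring,
            Int.add_mul_emod_self_right]
        exact Int.emod_eq_of_lt hx0 hxP
      rw [shiftR_eq key' L, shiftR_eq key L, hdiv', hmod']
    · rw [hashLoopA, dif_neg (by omega)]
      rw [foldChunks, dif_neg (by omega)]
      rw [band_mask_eq_mod, shiftR_eq, Int.shiftLeft_eq]
      have h := Int.emod_add_mul_ediv key (2 ^ L)
      linarith

-- the chunk fold seeded with 0 on a positive t does the first chunk immediately.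
lemma foldChunks_first (L : Nat) (hL : 0 < L) (mask t : Int) (ht : 0 < t) :
    foldChunks L mask t 0 = foldChunks L mask (t >>> L) (PySem.Int.bxor 0 (PySem.Int.band t mask)) := by
  rw [foldChunks, dif_pos ⟨ht, hL⟩]

-- ---------- Nat models: chunk XOR-fold and popcount ----------

def natFold (L n : Nat) : Nat :=
  if h : 0 < n ∧ 0 < L then (n % 2 ^ L) ^^^ natFold L (n / 2 ^ L) else 0
termination_by n
decreasing_by exact Nat.div_lt_self h.1 (Nat.one_lt_two_pow_iff.mpr (by omega))

def natPop (n : Nat) : Nat :=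
  if h : 0 < n then n % 2 + natPop (n / 2) else 0
termination_by n
decreasing_by exact Nat.div_lt_self h (by omega)

-- per-output-bit parity of the bits of n at positions i, i+L, i+2L, …
def parityUp (L n i : Nat) : Bool :=
  if h : 0 < n >>> i ∧ 0 < L then (n.testBit i).xor (parityUp L n (i + L)) else false
termination_by n >>> i
decreasing_by
  rw [Nat.shiftRight_add, Nat.shiftRight_eq_div_pow]
  exact Nat.div_lt_self h.1 (Nat.one_lt_two_pow_iff.mpr (by omega))

lemma shiftR_natCast (t : Int) (L : Nat) (ht : 0 ≤ t) :
    t >>> L = ((t.toNat / 2 ^ L : Nat) : Int) := by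
  have hc : ((2 ^ L : Nat) : Int) = 2 ^ L := by push_cast; ring
  rw [Int.shiftRight_eq_div_pow, Int.natCast_ediv, hc]
  congr 1
  omega

lemma foldChunks_eq_natFold (L : Nat) (hL : 0 < L) :
    ∀ N (t f : Int), t.toNat = N → 0 ≤ t → 0 ≤ f →
      foldChunks L (((1 : Int) <<< L) - 1) t f = ((f.toNat ^^^ natFold L t.toNat : Nat) : Int) := by
  intro N
  induction N using Nat.strong_induction_on with
  | _ N ih =>
    intro t f htn ht0 hf0
    by_cases ht : 0 < t
    · rw [foldChunks, dif_pos ⟨ht, hL⟩]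
      have hband : PySem.Int.band t (((1 : Int) <<< L) - 1) = ((t.toNat % 2 ^ L : Nat) : Int) := by
        rw [band_mask_eq_mod]
        have h1 : ((t.toNat : Nat) : Int) = t := Int.toNat_of_nonneg ht0
        rw [Int.natCast_emod, h1]
        norm_cast
      have hbx : PySem.Int.bxor f (PySem.Int.band t (((1 : Int) <<< L) - 1))
          = ((f.toNat ^^^ t.toNat % 2 ^ L : Nat) : Int) := by
        rw [hband, PySem.Int.bxor_of_nonneg hf0 (by positivity), Int.toNat_natCast]
      have hsr : t >>> L = ((t.toNat / 2 ^ L : Nat) : Int) := shiftR_natCast t L (by omega)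
      have hdec : t.toNat / 2 ^ L < N := by
        have h1 := shiftR_toNat_lt t L ht hL
        have h2 : (t >>> L).toNat = t.toNat / 2 ^ L := by
          rw [hsr]; exact Int.toNat_natCast _
        omega
      rw [hbx, hsr, ih (t.toNat / 2 ^ L) hdec _ _ (Int.toNat_natCast _) (by positivity) (by positivity)]
      have hstep : natFold L t.toNat = (t.toNat % 2 ^ L) ^^^ natFold L (t.toNat / 2 ^ L) := by
        conv_lhs => rw [natFold]
        rw [dif_pos (show 0 < t.toNat ∧ 0 < L by omega)]
      simp only [Int.toNat_natCast]
      rw [hstep]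
      congr 1
      rw [Nat.xor_assoc]
    · have ht0' : t = 0 := by omega
      subst ht0'
      rw [foldChunks, dif_neg (by omega)]
      have hnf : natFold L (0:Int).toNat = 0 := by
        rw [natFold, dif_neg (by simp)]
      rw [hnf, Nat.xor_zero, Int.toNat_of_nonneg hf0]

lemma natFold_lt (L : Nat) (hL : 0 < L) : ∀ n, natFold L n < 2 ^ L := by
  intro n
  induction n using Nat.strong_induction_on with
  | _ n ih =>
    by_cases hn : 0 < n
    · rw [natFold, dif_pos ⟨hn, hL⟩]
      exact Nat.xor_lt_two_pow (Nat.mod_lt _ (by positivity))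
        (ih _ (Nat.div_lt_self hn (Nat.one_lt_two_pow_iff.mpr (by omega))))
    · rw [natFold, dif_neg (by omega)]
      positivity

lemma shiftR_zero_iff (n i : Nat) : n >>> i = 0 ↔ n < 2 ^ i := by
  rw [Nat.shiftRight_eq_div_pow]
  constructor
  · intro h
    by_contra hlt
    have h2 : 2 ^ i ≤ n := by omega
    have := Nat.div_le_div_right (c := 2 ^ i) h2
    rw [Nat.div_self (by positivity)] at this
    omega
  · intro h
    exact Nat.div_eq_of_lt h

lemma parityUp_unfold (L n i : Nat) (hL : 0 < L) :
    parityUp L n i = (n.testBit i).xor (parityUp L n (i + L)) := by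
  by_cases h : 0 < n >>> i
  · rw [parityUp, dif_pos ⟨h, hL⟩]
  · have hz : n >>> i = 0 := Nat.le_zero.mp (Nat.not_lt.mp h)
    have hlt : n < 2 ^ i := (shiftR_zero_iff n i).mp hz
    have hb : n.testBit i = false := Nat.testBit_lt_two_pow hlt
    have hz2 : n >>> (i + L) = 0 := by
      rw [Nat.shiftRight_add, hz]
      simp
    rw [parityUp, dif_neg (by rw [hz]; simp)]
    rw [parityUp, dif_neg (by rw [hz2]; simp)]
    simp [hb]

lemma parityUp_shiftR (L : Nat) (hL : 0 < L) :
    ∀ N n i, n >>> (i + L) = N → parityUp L (n >>> L) i = parityUp L n (i + L) := by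
  intro N
  induction N using Nat.strong_induction_on with
  | _ N ih =>
    intro n i hN
    have hsh : (n >>> L) >>> i = n >>> (i + L) := by
      rw [← Nat.shiftRight_add, Nat.add_comm L i]
    by_cases h : 0 < n >>> (i + L)
    · rw [parityUp, dif_pos ⟨by rw [hsh]; exact h, hL⟩]
      conv_rhs => rw [parityUp, dif_pos ⟨h, hL⟩]
      have hbit : (n >>> L).testBit i = n.testBit (i + L) := by
        rw [Nat.testBit_shiftRight, Nat.add_comm L i]
      have hdec : n >>> ((i + L) + L) < N := by
        rw [← hN, Nat.shiftRight_add n (i + L) L, Nat.shiftRight_eq_div_pow (n >>> (i+L)) L]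
        exact Nat.div_lt_self h (Nat.one_lt_two_pow_iff.mpr (by omega))
      rw [hbit, ih _ hdec n (i + L) rfl]
    · rw [parityUp, dif_neg (by rw [hsh]; omega)]
      rw [parityUp, dif_neg (by omega)]

lemma natFold_testBit (L : Nat) (hL : 0 < L) (i : Nat) (hi : i < L) :
    ∀ n, (natFold L n).testBit i = parityUp L n i := by
  intro n
  induction n using Nat.strong_induction_on with
  | _ n ih =>
    by_cases hn : 0 < n
    · rw [natFold, dif_pos ⟨hn, hL⟩, Nat.testBit_xor, Nat.testBit_mod_two_pow]
      have hd : n / 2 ^ L < n := Nat.div_lt_self hn (Nat.one_lt_two_pow_iff.mpr (by omega))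
      rw [ih _ hd]
      have : n / 2 ^ L = n >>> L := (Nat.shiftRight_eq_div_pow n L).symm
      rw [this, parityUp_shiftR L hL (n >>> (i + L)) n i rfl]
      rw [parityUp_unfold L n i hL]
      simp [hi]
    · have : n = 0 := by omega
      subst this
      rw [natFold, dif_neg (by omega)]
      rw [parityUp, dif_neg (by simp)]
      simp

-- ---------- Nat popcount lemmas ----------

lemma mod_two_eq_toNat_testBit (x : Nat) : x % 2 = (x.testBit 0).toNat := by
  rw [Nat.testBit_eq_decide_div_mod_eq]
  rcases Nat.mod_two_eq_zero_or_one x with h | h <;> simp [h]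

lemma div2_lor (a b : Nat) : (a ||| b) / 2 = a / 2 ||| b / 2 := by
  apply Nat.eq_of_testBit_eq
  intro i
  have h : ∀ x : Nat, (x / 2).testBit i = x.testBit (i + 1) := by
    intro x
    rw [show i + 1 = Nat.succ i from rfl, Nat.testBit_succ]
  rw [Nat.testBit_or, h, h, h, Nat.testBit_or]

lemma div2_land (a b : Nat) : (a &&& b) / 2 = a / 2 &&& b / 2 := by
  apply Nat.eq_of_testBit_eq
  intro i
  have h : ∀ x : Nat, (x / 2).testBit i = x.testBit (i + 1) := by
    intro x
    rw [show i + 1 = Nat.succ i from rfl, Nat.testBit_succ]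
  rw [Nat.testBit_and, h, h, h, Nat.testBit_and]

lemma mod2_lor (a b : Nat) : (a ||| b) % 2 = a % 2 ||| b % 2 := by
  rw [mod_two_eq_toNat_testBit, mod_two_eq_toNat_testBit a, mod_two_eq_toNat_testBit b, Nat.testBit_or]
  cases a.testBit 0 <;> cases b.testBit 0 <;> simp

lemma mod2_land (a b : Nat) : (a &&& b) % 2 = a % 2 &&& b % 2 := by
  rw [mod_two_eq_toNat_testBit, mod_two_eq_toNat_testBit a, mod_two_eq_toNat_testBit b, Nat.testBit_and]
  cases a.testBit 0 <;> cases b.testBit 0 <;> simp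

lemma lor_eq_add_of_and_eq_zero : ∀ N (a b : Nat), a + b = N → a &&& b = 0 → a ||| b = a + b := by
  intro N
  induction N using Nat.strong_induction_on with
  | _ N ih =>
    intro a b hN hab
    by_cases ha : a = 0
    · simp [ha]
    · have h2 : a / 2 &&& b / 2 = 0 := by rw [← div2_land, hab]
      have h1 : a % 2 &&& b % 2 = 0 := by rw [← mod2_land, hab]
      have hIH' : a / 2 ||| b / 2 = a / 2 + b / 2 :=
        ih (a / 2 + b / 2) (by omega) (a / 2) (b / 2) rfl h2
      have hx : (a ||| b) = 2 * ((a ||| b) / 2) + (a ||| b) % 2 := by omega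
      rw [hx, div2_lor, mod2_lor, hIH']
      have hm1 : a % 2 < 2 := Nat.mod_lt _ (by omega)
      have hm2 : b % 2 < 2 := Nat.mod_lt _ (by omega)
      have hmor : a % 2 ||| b % 2 = a % 2 + b % 2 := by
        rcases Nat.mod_two_eq_zero_or_one a with h | h <;>
          rcases Nat.mod_two_eq_zero_or_one b with h' | h'
        · simp [h, h']
        · simp [h, h']
        · simp [h, h']
        · rw [h, h'] at h1
          simp at h1
      rw [hmor]
      omega

lemma natPop_unfold (n : Nat) : natPop n = n % 2 + natPop (n / 2) := by
  by_cases h : 0 < n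
  · rw [natPop, dif_pos h]
  · have : n = 0 := by omega
    subst this
    rw [natPop, dif_neg (by omega)]

lemma natPop_zero : natPop 0 = 0 := by
  rw [natPop, dif_neg (by omega)]

lemma bitCount_eq_natPop : ∀ n : Nat, PySem.Int.bitCount (n : Int) = natPop n := by
  intro n
  induction n using Nat.strong_induction_on with
  | _ n ih =>
    by_cases h : 0 < n
    · rw [PySem.Int.bitCount_natCast h, natPop_unfold, ih (n / 2) (Nat.div_lt_self h (by omega))]
    · have : n = 0 := by omega
      subst this
      rw [natPop, dif_neg (by omega)]
      exact_mod_cast PySem.Int.bitCount_zero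

lemma natPop_two_pow : ∀ j : Nat, natPop (2 ^ j) = 1 := by
  intro j
  induction j with
  | zero => rw [natPop, dif_pos (by omega)]; simp [natPop]
  | succ j ih =>
    rw [natPop_unfold]
    have h1 : 2 ^ (j + 1) % 2 = 0 := by
      have : 2 ^ (j + 1) = 2 * 2 ^ j := by ring
      omega
    have h2 : 2 ^ (j + 1) / 2 = 2 ^ j := by
      have : 2 ^ (j + 1) = 2 * 2 ^ j := by ring
      omega
    rw [h1, h2, ih]

lemma natPop_lor_disjoint : ∀ N (a b : Nat), a + b = N → a &&& b = 0 → natPop (a ||| b) = natPop a + natPop b := by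
  intro N
  induction N using Nat.strong_induction_on with
  | _ N ih =>
    intro a b hN hab
    by_cases ha0 : a = 0
    · simp [ha0, natPop_zero]
    · have h2 : a / 2 &&& b / 2 = 0 := by rw [← div2_land, hab]
      have h1 : a % 2 &&& b % 2 = 0 := by rw [← mod2_land, hab]
      have hIH : natPop (a / 2 ||| b / 2) = natPop (a / 2) + natPop (b / 2) :=
        ih (a / 2 + b / 2) (by omega) (a / 2) (b / 2) rfl h2
      rw [natPop_unfold (a ||| b), div2_lor, mod2_lor, hIH]
      have hmor : a % 2 ||| b % 2 = a % 2 + b % 2 := by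
        rcases Nat.mod_two_eq_zero_or_one a with h | h <;>
          rcases Nat.mod_two_eq_zero_or_one b with h' | h'
        · simp [h, h']
        · simp [h, h']
        · simp [h, h']
        · rw [h, h'] at h1
          simp at h1
      rw [hmor, natPop_unfold a, natPop_unfold b]
      omega

-- ---------- the comb mask ----------

lemma pyRange_pos_nil (a b s : Int) (hs : 0 < s) (h : b ≤ a) : PySem.List.pyRange a b s = [] := by
  rw [PySem.List.pyRange_of_pos a b hs, if_neg (by omega)]
  simp

lemma pyRange_pos_cons (a b s : Int) (hs : 0 < s) (hab : a < b) :
    PySem.List.pyRange a b s = a :: PySem.List.pyRange (a + s) b s := by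
  rw [PySem.List.pyRange_of_pos a b hs, PySem.List.pyRange_of_pos (a + s) b hs, if_pos hab]
  set d : Int := b - a with hd
  have hd0 : 0 < d := by omega
  have hdd : (d - 1) / s ≥ 0 := Int.ediv_nonneg (by omega) (by omega)
  have hkey : (b - a + s - 1) / s = (d - 1) / s + 1 := by
    rw [show b - a + s - 1 = (d - 1) + 1 * s by omega, Int.add_mul_ediv_right _ _ (by omega : s ≠ 0)]
  have hn' : (if a + s < b then ((b - (a + s) + s - 1) / s).toNat else 0) = ((d - 1) / s).toNat := by
    by_cases hc : a + s < b
    · rw [if_pos hc]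
      congr 1
      congr 1
      omega
    · rw [if_neg hc]
      have : (d - 1) / s = 0 := Int.ediv_eq_zero_of_lt (by omega) (by omega)
      omega
  rw [hkey, hn']
  have : ((d - 1) / s + 1).toNat = ((d - 1) / s).toNat + 1 := by omega
  rw [this, List.range_succ_eq_map, List.map_cons, List.map_map]
  congr 1
  · push_cast; ring
  · apply List.map_congr_left
    intro x _
    simp [Nat.succ_eq_add_one]
    push_cast
    ring

def combN (b s i : Int) : Nat :=
  (PySem.List.pyRange i b s).foldl (fun c j => c ||| 2 ^ j.toNat) 0

lemma fold_bor_cast (lst : List Int) : ∀ c : Nat,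
    lst.foldl (fun c j => PySem.Int.bor c ((1 : Int) <<< j.toNat)) (c : Int)
      = ((lst.foldl (fun c j => c ||| 2 ^ j.toNat) c : Nat) : Int) := by
  induction lst with
  | nil => intro c; simp
  | cons j rest ih =>
    intro c
    simp only [List.foldl_cons]
    rw [Int.one_shiftLeft j.toNat, PySem.Int.bor_natCast, ih]

lemma fold_or_acc (lst : List Int) : ∀ c : Nat,
    lst.foldl (fun c j => c ||| 2 ^ j.toNat) c = c ||| lst.foldl (fun c j => c ||| 2 ^ j.toNat) 0 := by
  induction lst with
  | nil => intro c; simp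
  | cons j rest ih =>
    intro c
    simp only [List.foldl_cons]
    rw [ih (c ||| 2 ^ j.toNat), ih (0 ||| 2 ^ j.toNat)]
    rw [Nat.zero_or, Nat.lor_assoc]

lemma combN_nil (b s i : Int) (hs : 0 < s) (h : b ≤ i) : combN b s i = 0 := by
  unfold combN
  rw [pyRange_pos_nil i b s hs h]
  rfl

lemma combN_cons (b s i : Int) (hs : 0 < s) (h : i < b) :
    combN b s i = 2 ^ i.toNat ||| combN b s (i + s) := by
  unfold combN
  rw [pyRange_pos_cons i b s hs h]
  simp only [List.foldl_cons]
  rw [fold_or_acc, Nat.zero_or]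

lemma combN_highbit (b s : Int) (hs : 0 < s) :
    ∀ N (i : Int), 0 ≤ i → (b - i).toNat = N → ∀ m : Nat, (m : Int) < i → (combN b s i).testBit m = false := by
  intro N
  induction N using Nat.strong_induction_on with
  | _ N ih =>
    intro i hi hN m hm
    by_cases hib : i < b
    · rw [combN_cons b s i hs hib, Nat.testBit_or, Nat.testBit_two_pow]
      have h1 : i.toNat ≠ m := by omega
      have hdec : (b - (i + s)).toNat < N := by omega
      rw [ih _ hdec (i + s) (by omega) rfl m (by omega)]
      simp [h1]
    · rw [combN_nil b s i hs (by omega)]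
      exact Nat.zero_testBit m

-- popcount parity of k masked by the comb at i equals the per-bit parity of k's bits i, i+L, …
lemma parity_combN (k : Nat) (b s : Int) (hs : 0 < s) (hb : k < 2 ^ b.toNat) :
    ∀ N (i : Int), 0 ≤ i → (b - i).toNat = N →
      natPop (k &&& combN b s i) % 2 = (parityUp s.toNat k i.toNat).toNat := by
  intro N
  induction N using Nat.strong_induction_on with
  | _ N ih =>
    intro i hi hN
    have hsL : 0 < s.toNat := by omega
    by_cases hib : i < b
    · set it : Nat := i.toNat with hit
      rw [combN_cons b s i hs hib, Nat.and_or_distrib_left]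
      have hdisj : (k &&& 2 ^ it) &&& (k &&& combN b s (i + s)) = 0 := by
        apply Nat.eq_of_testBit_eq
        intro m
        rw [Nat.testBit_and, Nat.testBit_and, Nat.testBit_and, Nat.testBit_two_pow, Nat.zero_testBit]
        by_cases hmit : it = m
        · subst hmit
          have : (combN b s (i + s)).testBit it = false := by
            apply combN_highbit b s hs (b - (i + s)).toNat (i + s) (by omega) rfl
            omega
          simp [this]
        · simp [hmit]
      rw [natPop_lor_disjoint ((k &&& 2 ^ it) + (k &&& combN b s (i + s))) _ _ rfl hdisj]
      have hpow : natPop (k &&& 2 ^ it) = (k.testBit it).toNat := by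
        rw [Nat.and_two_pow]
        cases h : k.testBit it
        · simp [natPop, Nat.zero_testBit]
        · simp [natPop_two_pow]
      have hdec : (b - (i + s)).toNat < N := by omega
      have hIH := ih _ hdec (i + s) (by omega) rfl
      have hits : (i + s).toNat = it + s.toNat := by omega
      rw [hits] at hIH
      rw [hpow, parityUp_unfold s.toNat k it hsL]
      cases hk : k.testBit it <;> cases hp : parityUp s.toNat k (it + s.toNat) <;>
        simp [hk, hp] at hIH ⊢ <;> omega
    · rw [combN_nil b s i hs (by omega)]
      rw [Nat.and_zero]
      have hz : natPop 0 = 0 := by rw [natPop, dif_neg (by omega)]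
      rw [hz]
      have hge : 2 ^ b.toNat ≤ 2 ^ i.toNat := Nat.pow_le_pow_right (by omega) (by omega)
      have hsh : k >>> i.toNat = 0 := (shiftR_zero_iff k i.toNat).mpr (by omega)
      rw [parityUp, dif_neg (by rw [hsh]; simp)]
      simp

-- ---------- B's outer loop invariant ----------

lemma outer_inv (key : Int) (hkey : 0 < key) (s : Int) (hs : 0 < s) :
    ∀ m : Nat, (m : Int) ≤ s →
      (PySem.List.pyRange 0 (m : Int) 1).foldl
        (fun out i =>
          let comb : Int := (PySem.List.pyRange i ((PySem.Int.bitLength key : Nat) : Int) s).foldl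
            (fun c j => PySem.Int.bor c ((1 : Int) <<< j.toNat)) 0
          if PySem.Int.bitCount (PySem.Int.band key comb) &&& 1 ≠ 0 then
            PySem.Int.bor out ((1 : Int) <<< i.toNat)
          else out) ((key >>> s.toNat) <<< s.toNat)
      = ((2 ^ s.toNat * (key.toNat / 2 ^ s.toNat) + natFold s.toNat key.toNat % 2 ^ m : Nat) : Int) := by
  have hsL : 0 < s.toNat := by omega
  set L : Nat := s.toNat with hLdef
  set k : Nat := key.toNat with hkdef
  set b : Int := ((PySem.Int.bitLength key : Nat) : Int) with hbdef
  have hkb : k < 2 ^ b.toNat := by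
    have h1 := PySem.Int.lt_two_pow_bitLength key
    have h2 : key.natAbs = k := by omega
    have h3 : b.toNat = PySem.Int.bitLength key := by omega
    rw [h3]
    omega
  set F : Nat := natFold L k with hFdef
  have hout0 : (key >>> L) <<< L = ((2 ^ L * (k / 2 ^ L) : Nat) : Int) := by
    rw [shiftR_natCast key L (by omega), Int.shiftLeft_eq]
    push_cast
    ring
  intro m
  induction m with
  | zero =>
    intro _
    rw [show ((0:Nat) : Int) = (0:Int) by norm_num, PySem.List.pyRange_one_eq_nil (by omega)]
    simp only [List.foldl_nil]
    rw [hout0]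
    norm_num
  | succ m ihm =>
    intro hms
    have hm1 : (m : Int) ≤ s := by push_cast at hms ⊢; omega
    have hmL : m < L := by omega
    rw [show ((m + 1 : Nat) : Int) = (m : Int) + 1 by push_cast; ring]
    rw [PySem.List.pyRange_one_succ_right (by positivity), List.foldl_append]
    rw [ihm hm1]
    simp only [List.foldl_cons, List.foldl_nil]
    -- evaluate the step at i = m
    have hcomb : (PySem.List.pyRange (m : Int) b s).foldl
        (fun c j => PySem.Int.bor c ((1 : Int) <<< j.toNat)) 0
        = ((combN b s (m : Int) : Nat) : Int) := by
      rw [show (0 : Int) = ((0 : Nat) : Int) by norm_num, fold_bor_cast]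
      rfl
    have hkeyc : key = ((k : Nat) : Int) := by omega
    have hcond : (PySem.Int.bitCount (PySem.Int.band key
          ((PySem.List.pyRange (m : Int) b s).foldl
            (fun c j => PySem.Int.bor c ((1 : Int) <<< j.toNat)) 0)) &&& 1 ≠ 0)
        ↔ F.testBit m = true := by
      rw [hcomb]
      conv_lhs => rw [hkeyc]
      rw [PySem.Int.band_natCast, bitCount_eq_natPop, Nat.and_one_is_mod]
      rw [parity_combN k b s hs hkb (b - (m : Int)).toNat (m : Int) (by positivity) rfl]
      rw [show ((m : Int)).toNat = m from Int.toNat_natCast m, ← hLdef]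
      rw [← natFold_testBit L hsL m hmL k]
      cases (natFold L k).testBit m <;> simp
    set A : Nat := 2 ^ L * (k / 2 ^ L) + F % 2 ^ m with hA
    have hbitA : A.testBit m = false := by
      have hr : F % 2 ^ m < 2 ^ L := lt_of_lt_of_le (Nat.mod_lt _ (by positivity)) (Nat.pow_le_pow_right (by omega) (by omega))
      rw [hA, Nat.testBit_two_pow_mul_add _ hr, if_pos hmL, Nat.testBit_mod_two_pow]
      simp
    have hmodsucc : F % 2 ^ (m + 1) = F % 2 ^ m + 2 ^ m * (F / 2 ^ m % 2) := Nat.mod_pow_succ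
    have htb : F.testBit m = decide (F / 2 ^ m % 2 = 1) := Nat.testBit_eq_decide_div_mod_eq
    by_cases hc : F.testBit m = true
    · rw [if_pos (by exact hcond.mpr hc)]
      rw [show ((m : Int)).toNat = m from Int.toNat_natCast m]
      have h2m : (1 : Int) <<< m = ((2 ^ m : Nat) : Int) := by
        rw [Int.shiftLeft_eq, one_mul]
        push_cast
        ring
      rw [h2m, PySem.Int.bor_natCast]
      have hand : A &&& 2 ^ m = 0 := by
        rw [Nat.and_two_pow, hbitA]
        simp
      rw [lor_eq_add_of_and_eq_zero (A + 2 ^ m) A (2 ^ m) rfl hand]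
      congr 1
      have : F / 2 ^ m % 2 = 1 := by
        rw [htb] at hc
        simpa using hc
      rw [hA, hmodsucc, this]
      ring
    · rw [if_neg (by
        intro hcc
        exact hc (hcond.mp hcc))]
      congr 1
      have h0 : F / 2 ^ m % 2 = 0 := by
        rw [htb] at hc
        simp at hc
        omega
      rw [hA, hmodsucc, h0]
      ring

-- ===== VERDICT (by name: the statement is the Claim_ definition above) =====
theorem hash_index_spec : Claim_equal_hash_index := by
  intro key index_len _ hpre
  unfold Spec_hash_index hash_index hash_index_alt
  by_cases h0 : index_len = 0
  · simp [h0]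
  · have hL : 0 < index_len.toNat := by
      unfold Pre_hash_index at hpre
      omega
    rw [if_neg h0]
    set L : Nat := index_len.toNat with hLdef
    by_cases htag : key >>> L ≤ 0
    · rw [if_pos (Or.inr htag), hashLoopA, dif_neg (by omega)]
    · rw [if_neg (by
        rw [not_or]
        exact ⟨h0, by omega⟩)]
      have htag' : 0 < key >>> L := by omega
      have hkey : 0 < key := by
        by_contra hk
        have hk' : key ≤ 0 := by omega
        have he : key >>> L = key / 2 ^ L := shiftR_eq key L
        have : key / 2 ^ L ≤ 0 :=
          Int.ediv_nonpos_of_nonpos_of_neg hk' (by positivity)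
        omega
      -- A side
      have hA : hashLoopA L key (key >>> L)
          = ((key >>> L) <<< L) + ((natFold L key.toNat : Nat) : Int) := by
        rw [loop_invariant L hL (key >>> L).toNat (key >>> L) rfl key]
        congr 1
        have hz : PySem.Int.bxor 0 (PySem.Int.band key (((1 : Int) <<< L) - 1))
            = PySem.Int.band key (((1 : Int) <<< L) - 1) := by
          rw [PySem.Int.bxor_comm, PySem.Int.bxor_zero]
        have hstep : foldChunks L (((1 : Int) <<< L) - 1) key 0
            = foldChunks L (((1 : Int) <<< L) - 1) (key >>> L) (PySem.Int.band key (((1 : Int) <<< L) - 1)) := by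
          rw [foldChunks_first L hL _ key hkey, hz]
        rw [← hstep]
        rw [foldChunks_eq_natFold L hL key.toNat key 0 rfl (by omega) (by omega)]
        simp
      rw [hA]
      -- B side
      have hs : 0 < index_len := by omega
      have hLs : ((L : Nat) : Int) = index_len := by omega
      have hB := outer_inv key hkey index_len hs L (by omega)
      rw [hLs] at hB
      show ((key >>> L) <<< L) + ((natFold L key.toNat : Nat) : Int)
          = (PySem.List.pyRange 0 index_len 1).foldl
              (fun out i =>
                let comb : Int := (PySem.List.pyRange i ((PySem.Int.bitLength key : Nat) : Int) index_len).foldl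
                  (fun c j => PySem.Int.bor c ((1 : Int) <<< j.toNat)) 0
                if PySem.Int.bitCount (PySem.Int.band key comb) &&& 1 ≠ 0 then
                  PySem.Int.bor out ((1 : Int) <<< i.toNat)
                else out) ((key >>> index_len.toNat) <<< index_len.toNat)
      rw [hB]
      have hmod : natFold L key.toNat % 2 ^ L = natFold L key.toNat :=
        Nat.mod_eq_of_lt (natFold_lt L hL key.toNat)
      rw [hmod]
      have hout0 : (key >>> L) <<< L = ((2 ^ L * (key.toNat / 2 ^ L) : Nat) : Int) := by
        rw [shiftR_natCast key L (by omega), Int.shiftLeft_eq]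
        push_cast
        ring
      rw [hout0]
      push_cast
      ring
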